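-- pv_equiv track=rewrite | github.com/TurkuNLP/Turku-neural-parser-pipeline | tnparser/udify_mod.py | read_conllu
-- ===== SOURCE A (Python) =====
-- def read_conllu(txt):
--     sent=[]
--     comment=[]
--     for line in txt.split("\n"):
--         line=line.strip()
--         if not line: # new sentence
--             if sent:
--                 yield comment,sent
--             comment=[]
--             sent=[]
--         elif line.startswith("#"):
--             comment.append(line)
--         else: #normal line
--             sent.append(line.split("\t"))
--     else:
--         if sent:
--             yield comment, sent
-- ===== SOURCE B (Python) =====
-- def read_conllu(txt):
--     # Pass 1: partition stripped lines into blocks separated by blank lines.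
--     blocks = []
--     cur = []
--     for line in txt.split("\n"):
--         line = line.strip()
--         if line:
--             cur.append(line)
--         else:
--             blocks.append(cur)
--             cur = []
--     blocks.append(cur)
--     # Pass 2: per block, comments vs token lines; comment-only blocks yield nothing.
--     for block in blocks:
--         sent = [l.split("\t") for l in block if not l.startswith("#")]
--         if sent:
--             yield [l for l in block if l.startswith("#")], sent
-- ===== Notes on version B (the rewrite author's own statement) =====
-- stated objective: alternative
-- what changed: Replaces A's single stateful loop carrying comment/sentence accumulators plus yield-on-flush with a two-phase decomposition: first partition stripped lines into blank-separated blocks, then derive each block's comment and token lists by filtering.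
import Mathlib
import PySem

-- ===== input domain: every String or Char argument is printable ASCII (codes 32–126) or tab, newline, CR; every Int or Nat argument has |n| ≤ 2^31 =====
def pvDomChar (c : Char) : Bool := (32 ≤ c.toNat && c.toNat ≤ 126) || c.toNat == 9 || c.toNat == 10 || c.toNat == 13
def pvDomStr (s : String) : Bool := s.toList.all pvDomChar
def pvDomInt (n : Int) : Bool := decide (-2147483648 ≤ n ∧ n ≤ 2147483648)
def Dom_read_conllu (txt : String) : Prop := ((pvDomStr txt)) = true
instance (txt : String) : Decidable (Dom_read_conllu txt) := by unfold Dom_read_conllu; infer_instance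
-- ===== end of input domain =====

-- B replaces A's single stateful loop by a two-phase decomposition (blank-separated
-- blocks first, then per-block comment/token filtering); objective: alternative.

-- s.split(sep) for a nonempty literal sep (exact there: PySem.Str.split? is none only for sep = "")
def rcSplit (s sep : String) : List String := (PySem.Str.split? s sep).getD []

-- ===== PORT A =====
-- A's loop body: state = (sent, comment, out), out collects the yielded pairs.
def rcStepA (st : List (List String) × List String × List (List String × List (List String)))
    (rawline : String) : List (List String) × List String × List (List String × List (List String)) :=
  let (sent, comment, out) := st
  let line := PySem.Str.strip rawline
  if line = "" then
    if sent ≠ [] then ([], [], out ++ [(comment, sent)]) else ([], [], out)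
  else if PySem.Str.startswith line "#" then
    (sent, comment ++ [line], out)
  else
    (sent ++ [rcSplit line "\t"], comment, out)

-- A's final flush after the for-else.
def rcFinA (st : List (List String) × List String × List (List String × List (List String))) :
    List (List String × List (List String)) :=
  let (sent, comment, out) := st
  if sent ≠ [] then out ++ [(comment, sent)] else out

def read_conllu (txt : String) : List (List String × List (List String)) :=
  rcFinA ((rcSplit txt "\n").foldl rcStepA ([], [], []))

-- ===== PORT B =====
-- B pass 1 loop body: state = (blocks, cur).
def rcStepB (st : List (List String) × List String) (rawline : String) :
    List (List String) × List String :=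
  let (blocks, cur) := st
  let line := PySem.Str.strip rawline
  if line ≠ "" then (blocks, cur ++ [line]) else (blocks ++ [cur], [])

-- B pass 2: one block → zero or one yielded pairs.
def rcProc (block : List String) : List (List String × List (List String)) :=
  let sent := (block.filter (fun l => !PySem.Str.startswith l "#")).map (fun l => rcSplit l "\t")
  if sent ≠ [] then [(block.filter (fun l => PySem.Str.startswith l "#"), sent)] else []

def read_conllu_alt (txt : String) : List (List String × List (List String)) :=
  let (blocks, cur) := (rcSplit txt "\n").foldl rcStepB ([], [])
  (blocks ++ [cur]).flatMap rcProc

-- ===== PRECONDITION & SPEC =====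
def Spec_read_conllu (txt : String) (out : List (List String × List (List String))) : Prop := out = read_conllu_alt txt
instance (txt : String) (out : List (List String × List (List String))) : Decidable (Spec_read_conllu txt out) := by unfold Spec_read_conllu; infer_instance

-- ===== CLAIM (what is proved, stated in full; the proofs are below) =====
def Claim_equal_read_conllu : Prop := ∀ (txt : String), Dom_read_conllu txt → Spec_read_conllu txt (read_conllu txt)

-- ===== LEMMAS AND PROOFS =====
-- A's two accumulators, read off from B's current block.
def rcSentOf (cur : List String) : List (List String) :=
  (cur.filter (fun l => !PySem.Str.startswith l "#")).map (fun l => rcSplit l "\t")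
def rcComOf (cur : List String) : List String :=
  cur.filter (fun l => PySem.Str.startswith l "#")

theorem rcStepB_blocks_append (lines : List String) (bs : List (List String)) (cur : List String) :
    lines.foldl rcStepB (bs, cur)
      = (bs ++ (lines.foldl rcStepB ([], cur)).1, (lines.foldl rcStepB ([], cur)).2) := by
  induction lines generalizing bs cur with
  | nil => simp
  | cons line rest ih =>
    simp only [List.foldl_cons, rcStepB]
    split_ifs with hif
    · exact ih bs (cur ++ [PySem.Str.strip line])
    · simp only [List.nil_append]
      rw [ih (bs ++ [cur]) [], ih [cur] []]; simp

theorem rc_main (lines : List String) (cur : List String)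
    (out : List (List String × List (List String))) :
    rcFinA (lines.foldl rcStepA (rcSentOf cur, rcComOf cur, out))
      = out ++ ((lines.foldl rcStepB ([], cur)).1 ++ [(lines.foldl rcStepB ([], cur)).2]).flatMap rcProc := by
  induction lines generalizing cur out with
  | nil =>
    simp only [List.foldl_nil, List.nil_append, List.flatMap_cons, List.flatMap_nil,
      List.append_nil]
    simp only [rcFinA, rcProc, rcSentOf, rcComOf]
    split_ifs <;> simp
  | cons line rest ih =>
    simp only [List.foldl_cons, rcStepA, rcStepB]
    by_cases h : PySem.Str.strip line = ""
    · simp only [h]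
      have hout : rcFinA (List.foldl rcStepA
              (if rcSentOf cur ≠ [] then ([], [], out ++ [(rcComOf cur, rcSentOf cur)]) else ([], [], out)) rest)
          = out ++ rcProc cur ++ ((rest.foldl rcStepB ([], [])).1 ++ [(rest.foldl rcStepB ([], [])).2]).flatMap rcProc := by
        have hnil : (([], [], out ++ rcProc cur) :
              List (List String) × List String × List (List String × List (List String)))
            = (rcSentOf [], rcComOf [], out ++ rcProc cur) := by simp [rcSentOf, rcComOf]
        have hone : (if rcSentOf cur ≠ [] then ([], [], out ++ [(rcComOf cur, rcSentOf cur)]) else ([], [], out))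
            = (([], [], out ++ rcProc cur) :
              List (List String) × List String × List (List String × List (List String))) := by
          simp only [rcProc, rcSentOf, rcComOf]
          split_ifs <;> simp_all
        rw [hone, hnil, ih [] (out ++ rcProc cur)]
      simp only [reduceIte, List.nil_append]
      rw [hout, if_neg (by simp : ¬("" ≠ "")), rcStepB_blocks_append rest [cur] []]
      simp [List.flatMap_append]
    · rw [if_neg h, if_pos h]
      by_cases hc : PySem.Chars.startswith (PySem.Chars.strip line.toList) ['#'] = true
      · have hc' : PySem.Str.startswith (PySem.Str.strip line) "#" = true := by simpa using hc
        rw [if_pos hc']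
        have hs : rcSentOf cur = rcSentOf (cur ++ [PySem.Str.strip line]) := by
          simp only [rcSentOf, List.filter_append, List.filter_cons, List.filter_nil]
          simp [hc]
        have hm : rcComOf cur ++ [PySem.Str.strip line] = rcComOf (cur ++ [PySem.Str.strip line]) := by
          simp only [rcComOf, List.filter_append, List.filter_cons, List.filter_nil]
          simp [hc]
        rw [hs, hm]; exact ih _ out
      · have hc' : ¬ PySem.Str.startswith (PySem.Str.strip line) "#" = true := by simpa using hc
        simp only [Bool.not_eq_true] at hc
        rw [if_neg hc']
        have hs : rcSentOf cur ++ [rcSplit (PySem.Str.strip line) "\t"]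
            = rcSentOf (cur ++ [PySem.Str.strip line]) := by
          simp only [rcSentOf, List.filter_append, List.filter_cons, List.filter_nil]
          simp [hc]
        have hm : rcComOf cur = rcComOf (cur ++ [PySem.Str.strip line]) := by
          simp only [rcComOf, List.filter_append, List.filter_cons, List.filter_nil]
          simp [hc]
        rw [hs, hm]; exact ih _ out

-- ===== VERDICT (by name: the statement is the Claim_ definition above) =====
theorem read_conllu_spec : Claim_equal_read_conllu := by
  intro txt _
  unfold Spec_read_conllu read_conllu read_conllu_alt
  have := rc_main (rcSplit txt "\n") [] []
  simpa [rcSentOf, rcComOf] using this
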